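-- pv_equiv track=rewrite | github.com/pypi-data/pypi-mirror-401 | packages/pyaerocom/pyaerocom-0.36.0.tar.gz/pyaerocom-0.36.0/pyaerocom/_lowlevel_helpers.py | sort_dict_by_name
-- ===== SOURCE A (Python) =====
-- from typing import TypeVar
--
-- T = TypeVar("T")
--
-- def sort_dict_by_name(d: dict[str, T], pref_list: list[str] | None = None) -> dict[str, T]:
--     """Sort entries of input dictionary by their names and return ordered
--
--     Parameters
--     ----------
--     d : dict
--         input dictionary
--     pref_list : list, optional
--         preferred order of items (may be subset of keys in input dict)
--
--     Returns
--     -------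
--     dict
--         sorted and ordered dictionary
--     """
--     if pref_list is None:
--         pref_list = []
--     s = {}
--     sorted_keys = sorted(d)
--     for k in pref_list:
--         if k in d:
--             s[k] = d[k]
--     for k in sorted_keys:
--         if k not in pref_list:
--             s[k] = d[k]
--     return s
-- ===== SOURCE B (Python) =====
-- from typing import TypeVar
--
-- T = TypeVar("T")
--
-- def sort_dict_by_name(d: dict[str, T], pref_list: list[str] | None = None) -> dict[str, T]:
--     """Single keyed sort: preferred keys rank by their position in pref_list,
--     all other keys rank after them, alphabetically."""
--     if pref_list is None:
--         pref_list = []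
--     def rank(k):
--         return (pref_list.index(k) if k in pref_list else len(pref_list), k)
--     return {k: d[k] for k in sorted(d, key=rank)}
-- ===== Notes on version B (the rewrite author's own statement) =====
-- stated objective: idiomatic
-- what changed: B replaces A's sort-then-two-partition-insertion-loops by a single sorted() call with a composite key ((pref_list.index(k), k) for preferred keys, (len(pref_list), k) for the rest) and one dict comprehension.
import Mathlib
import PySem

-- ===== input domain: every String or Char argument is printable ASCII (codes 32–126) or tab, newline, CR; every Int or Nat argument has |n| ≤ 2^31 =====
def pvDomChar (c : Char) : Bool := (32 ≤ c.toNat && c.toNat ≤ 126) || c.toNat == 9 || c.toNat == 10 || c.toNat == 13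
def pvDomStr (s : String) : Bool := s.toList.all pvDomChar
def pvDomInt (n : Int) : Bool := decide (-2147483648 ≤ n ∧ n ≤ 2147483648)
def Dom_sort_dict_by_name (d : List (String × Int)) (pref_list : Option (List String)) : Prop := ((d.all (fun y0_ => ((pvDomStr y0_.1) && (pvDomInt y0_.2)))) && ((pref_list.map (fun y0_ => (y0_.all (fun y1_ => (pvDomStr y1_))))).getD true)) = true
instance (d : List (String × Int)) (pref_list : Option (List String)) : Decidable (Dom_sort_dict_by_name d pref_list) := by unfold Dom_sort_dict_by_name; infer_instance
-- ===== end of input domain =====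

-- B replaces A's sort-then-two-insertion-loops by a SINGLE keyed sort (composite rank) plus one map; same result, different algorithm.

-- ===== PORT A =====
-- A builds a dict s by two insertion loops: first the preferred keys present in d
-- (in pref_list order), then the remaining keys of d in sorted order.
def sort_dict_by_name (d : List (String × Int)) (pref_list : Option (List String)) : List (String × Int) :=
  let pl : List String := pref_list.getD []                    -- if pref_list is None: pref_list = []
  let dd : PySem.Dict String Int := PySem.Dict.mk d            -- the input dict
  let sorted_keys := PySem.List.sorted dd.keys (fun k => k) false   -- sorted(d)
  -- for k in pref_list: if k in d: s[k] = d[k]   (the `k in d` guard makes d[k] total; 0 default never read)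
  let s1 := pl.foldl (fun s k => if dd.contains k then s.insert k (dd.getD k 0) else s) PySem.Dict.empty
  -- for k in sorted_keys: if k not in pref_list: s[k] = d[k]
  let s2 := sorted_keys.foldl (fun s k => if pl.contains k then s else s.insert k (dd.getD k 0)) s1
  s2.items

-- ===== PORT B =====
-- B: rank(k) = (pref_list.index(k) if k in pref_list else len(pref_list), k);
-- return {k: d[k] for k in sorted(d, key=rank)}.  sorted with the tuple key is PySem.List.sorted2.
def sort_dict_by_name_alt (d : List (String × Int)) (pref_list : Option (List String)) : List (String × Int) :=
  let pl : List String := pref_list.getD []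
  -- first component of rank: the `k in pref_list` guard makes .index(k) exactly index?'s some branch
  let rank1 : String → Int := fun k =>
    match PySem.List.index? pl k with
    | some i => (i : Int)
    | none => (pl.length : Int)
  let ordered := PySem.List.sorted2 (PySem.Dict.mk d : PySem.Dict String Int).keys rank1 (fun k => k) false
  ordered.map (fun k => (k, (PySem.Dict.mk d : PySem.Dict String Int).getD k 0))

-- ===== PRECONDITION & SPEC =====
-- A Python dict has unique keys; Pre_ states that invariant of the association-list encoding
-- (a list with duplicate keys does not denote any Python input of this function).
def Pre_sort_dict_by_name (d : List (String × Int)) (pref_list : Option (List String)) : Prop :=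
  (d.map Prod.fst).Nodup
instance (d : List (String × Int)) (pref_list : Option (List String)) : Decidable (Pre_sort_dict_by_name d pref_list) := by unfold Pre_sort_dict_by_name; infer_instance

def pvWitness_sort_dict_by_name : (List (String × Int)) × Option (List String) :=
  ([("b", 1), ("a", 2), ("c", 3)], some ["c", "x", "b"])

def Spec_sort_dict_by_name (d : List (String × Int)) (pref_list : Option (List String)) (out : List (String × Int)) : Prop := out = sort_dict_by_name_alt d pref_list
instance (d : List (String × Int)) (pref_list : Option (List String)) (out : List (String × Int)) : Decidable (Spec_sort_dict_by_name d pref_list out) := by unfold Spec_sort_dict_by_name; infer_instance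

-- ===== CLAIM (what is proved, stated in full; the proofs are below) =====
def Claim_equal_sort_dict_by_name : Prop := ∀ (d : List (String × Int)) (pref_list : Option (List String)), Dom_sort_dict_by_name d pref_list → Pre_sort_dict_by_name d pref_list → Spec_sort_dict_by_name d pref_list (sort_dict_by_name d pref_list)

-- ===== LEMMAS AND PROOFS =====

theorem pv_insert_mkmap (v : String → Int) (m : List String) (k : String) :
    (PySem.Dict.mk (m.map (fun j => (j, v j)))).insert k (v k)
      = PySem.Dict.mk ((PySem.Set.add m k).map (fun j => (j, v j))) := by
  apply PySem.Dict.ext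
  rw [PySem.Dict.items_insert]
  by_cases hk : k ∈ m
  · have hc : (PySem.Dict.mk (m.map (fun j => (j, v j)))).contains k = true := by
      simp [PySem.Dict.contains_mk, List.any_map]
      exact hk
    rw [if_pos hc]
    have hadd : PySem.Set.add m k = m := by simp [PySem.Set.add, PySem.Set.contains, hk]
    rw [hadd]
    simp only [List.map_map]
    apply List.map_congr_left
    intro j hj
    by_cases h : j = k
    · subst h; simp
    · simp [h]
  · have hc : (PySem.Dict.mk (m.map (fun j => (j, v j)))).contains k = false := by
      simp [PySem.Dict.contains_mk, List.any_map]
      intro x hx h; exact hk (h ▸ hx)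
    rw [if_neg (by simp [hc])]
    have hadd : PySem.Set.add m k = m ++ [k] := by simp [PySem.Set.add, PySem.Set.contains, hk]
    rw [hadd]; simp

theorem pv_fold_mkmap (v : String → Int) (p : String → Bool) (l : List String) (m : List String) :
    l.foldl (fun s k => if p k then s.insert k (v k) else s)
        (PySem.Dict.mk (m.map (fun j => (j, v j))))
      = PySem.Dict.mk ((PySem.Set.update m (l.filter p)).map (fun j => (j, v j))) := by
  induction l generalizing m with
  | nil => simp [PySem.Set.update_nil]
  | cons x t ih =>
    by_cases hx : p x = true
    · rw [List.filter_cons_of_pos hx, PySem.Set.update_cons, List.foldl_cons, if_pos hx,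
        pv_insert_mkmap]
      exact ih (PySem.Set.add m x)
    · rw [List.filter_cons_of_neg hx, List.foldl_cons, if_neg hx]
      exact ih m

theorem pv_dedup_idx (l : List String) (p : String → Bool) :
    (PySem.Set.ofList (l.filter p)).Pairwise (fun a b => l.idxOf a < l.idxOf b) := by
  induction l with
  | nil => simp
  | cons x t ih =>
    by_cases hx : p x = true
    · rw [List.filter_cons_of_pos hx, PySem.Set.ofList_cons]
      refine List.Pairwise.cons ?_ ?_
      · intro b hb
        have hbx : b ≠ x := by
          have := (List.mem_filter.1 hb).2; simpa using this
        have h1 : (x == b) = false := by simp [Ne.symm hbx]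
        simp [List.idxOf_cons, h1]
      · have hsub : (PySem.Set.discard (PySem.Set.ofList (t.filter p)) x).Sublist
            (PySem.Set.ofList (t.filter p)) := by
          simpa [PySem.Set.discard] using (List.filter_sublist (l := PySem.Set.ofList (t.filter p)) (p := fun y => !y == x))
        refine ((ih.sublist hsub).imp_of_mem ?_)
        intro a b ha hb hab
        have hax : a ≠ x := by have := (List.mem_filter.1 ha).2; simpa using this
        have hbx : b ≠ x := by have := (List.mem_filter.1 hb).2; simpa using this
        have h1 : (x == a) = false := by simp [Ne.symm hax]
        have h2 : (x == b) = false := by simp [Ne.symm hbx]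
        simp [List.idxOf_cons, h1, h2]
        omega
    · rw [List.filter_cons_of_neg hx]
      refine ih.imp_of_mem ?_
      intro a b ha hb hab
      have hax : a ≠ x := by
        have := (PySem.Set.mem_ofList _ _).1 ha
        exact fun h => hx (h ▸ (List.of_mem_filter this))
      have hbx : b ≠ x := by
        have := (PySem.Set.mem_ofList _ _).1 hb
        exact fun h => hx (h ▸ (List.of_mem_filter this))
      have h1 : (x == a) = false := by simp [Ne.symm hax]
      have h2 : (x == b) = false := by simp [Ne.symm hbx]
      simp [List.idxOf_cons, h1, h2]
      omega

theorem pv_idxOf?_of_mem (a : String) (l : List String) (h : a ∈ l) :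
    l.idxOf? a = some (l.idxOf a) := by
  induction l with
  | nil => simp at h
  | cons b t ih =>
    by_cases hb : b = a
    · subst hb; simp [List.idxOf?_cons, List.idxOf_cons]
    · have h1 : (b == a) = false := by simp [hb]
      have ht : a ∈ t := by
        cases h with
        | head => exact absurd rfl hb
        | tail _ h => exact h
      simp [List.idxOf?_cons, List.idxOf_cons, h1, ih ht]

theorem pv_sorted2_eq_sorted_lex (xs : List String) (k1 : String → Int) :
    PySem.List.sorted2 xs k1 (fun k => k) false
      = PySem.List.sorted xs (fun k => toLex (k1 k, k)) false := by
  show List.foldl _ [] xs = List.foldl _ [] xs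
  congr 1
  funext acc x
  congr 1
  funext a b
  simp only [Bool.false_eq_true, if_false]
  have : (toLex (k1 a, a) < toLex (k1 b, b)) ↔ (k1 a < k1 b ∨ (k1 a = k1 b ∧ a < b)) := by
    simp [Prod.Lex.lt_iff]
  by_cases h1 : k1 a < k1 b
  · simp [h1, this]
  · by_cases h2 : k1 b < k1 a
    · have : ¬ (toLex (k1 a, a) < toLex (k1 b, b)) := by simp [this]; omega
      simp [h1, h2, this]
    · have he : k1 a = k1 b := le_antisymm (not_lt.1 h2) (not_lt.1 h1)
      by_cases h3 : a < b
      · simp only [h1, h2, h3, decide_true, decide_false, Bool.not_false, Bool.true_and,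
          Bool.false_or]
        exact (decide_eq_true (this.2 (Or.inr ⟨he, h3⟩))).symm
      · simp only [h1, h2, h3, decide_false, Bool.not_false, Bool.true_and, Bool.false_or]
        have : ¬ toLex (k1 a, a) < toLex (k1 b, b) := fun hc => (this.1 hc).elim (fun h => h1 h) (fun h => h3 h.2)
        exact (decide_eq_false this).symm

theorem pv_main (d : List (String × Int)) (pref_list : Option (List String))
    (hpre : (d.map Prod.fst).Nodup) :
    sort_dict_by_name d pref_list = sort_dict_by_name_alt d pref_list := by
  unfold sort_dict_by_name sort_dict_by_name_alt
  dsimp only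
  set pl : List String := pref_list.getD [] with hpl
  set dd : PySem.Dict String Int := PySem.Dict.mk d with hdd
  set keys : List String := dd.keys with hkeys
  have hkeys' : keys = d.map Prod.fst := by simp [hkeys, hdd, PySem.Dict.keys]
  have hknd : keys.Nodup := hkeys' ▸ hpre
  set rank1 : String → Int := fun k =>
    match PySem.List.index? pl k with
    | some i => (i : Int)
    | none => (pl.length : Int) with hrank
  set p1 : String → Bool := fun k => dd.contains k with hp1
  set p2 : String → Bool := fun k => !pl.contains k with hp2
  set sorted_keys := PySem.List.sorted keys (fun k => k) false with hsk
  -- basic membership facts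
  have hcont : ∀ a : String, dd.contains a = true ↔ a ∈ keys := by
    intro a
    simp [hdd, PySem.Dict.contains_mk, hkeys', List.any_eq_true, List.mem_map]
  have hplmem : ∀ a : String, pl.contains a = true ↔ a ∈ pl := by
    intro a; simp
  -- rank1 facts
  have hr1 : ∀ a ∈ pl, rank1 a = (pl.idxOf a : Int) := by
    intro a ha
    simp [hrank, PySem.List.index?_eq_idxOf?, pv_idxOf?_of_mem a pl ha]
  have hr2 : ∀ a, a ∉ pl → rank1 a = (pl.length : Int) := by
    intro a ha
    simp [hrank, PySem.List.index?_eq_idxOf?, List.idxOf?_eq_none_iff.2 ha]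
  -- reduce port A via the fold lemmas
  set M1 : List String := PySem.Set.ofList (pl.filter p1) with hM1
  set R' : List String := sorted_keys.filter p2 with hR'
  have hA1 : pl.foldl (fun s k => if dd.contains k then s.insert k (dd.getD k 0) else s) PySem.Dict.empty
      = PySem.Dict.mk (M1.map (fun j => (j, dd.getD j 0))) := by
    have := pv_fold_mkmap (fun j => dd.getD j 0) p1 pl []
    simpa [PySem.Set.ofList_eq_foldl, PySem.Set.update, PySem.Dict.empty, hM1, hp1] using this
  have hstep : (fun (s : PySem.Dict String Int) k => if pl.contains k then s else s.insert k (dd.getD k 0))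
      = (fun s k => if p2 k then s.insert k (dd.getD k 0) else s) := by
    funext s k
    by_cases h : pl.contains k = true <;> simp [hp2, h]
  have hA2 : sorted_keys.foldl (fun s k => if pl.contains k then s else s.insert k (dd.getD k 0))
        (PySem.Dict.mk (M1.map (fun j => (j, dd.getD j 0))))
      = PySem.Dict.mk ((PySem.Set.update M1 R').map (fun j => (j, dd.getD j 0))) := by
    rw [hstep]
    simpa [hR'] using pv_fold_mkmap (fun j => dd.getD j 0) p2 sorted_keys M1
  -- disjointness: update = append
  have hsknd : sorted_keys.Nodup := ((PySem.List.sorted_perm keys (fun k => k) false).nodup_iff).2 hknd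
  have hRnd : R'.Nodup := hsknd.filter p2
  have hMpl : ∀ x ∈ M1, x ∈ pl := by
    intro x hx
    have := (PySem.Set.mem_ofList _ _).1 hx
    exact (List.mem_filter.1 this).1
  have hRpl : ∀ x ∈ R', x ∉ pl := by
    intro x hx
    have := (List.mem_filter.1 hx).2
    simpa [hp2] using this
  have hupd : PySem.Set.update M1 R' = M1 ++ R' :=
    PySem.Set.update_eq_append_of_disjoint M1 R' hRnd (fun x hx hxm => hRpl x hx (hMpl x hxm))
  -- the permutation
  have hperm : (M1 ++ R').Perm keys := by
    have h1 : M1.Perm (keys.filter (fun k => pl.contains k)) := by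
      refine (List.perm_ext_iff_of_nodup (PySem.Set.nodup_ofList _) (hknd.filter _)).2 ?_
      intro a
      rw [PySem.Set.mem_ofList]
      simp only [List.mem_filter, hp1]
      constructor
      · rintro ⟨ha, hc⟩; exact ⟨(hcont a).1 hc, by simpa using ha⟩
      · rintro ⟨hk, hc⟩; exact ⟨by simpa using hc, (hcont a).2 hk⟩
    have h2 : R'.Perm (keys.filter p2) :=
      (PySem.List.sorted_perm keys (fun k => k) false).filter p2
    exact (h1.append h2).trans
      (by simpa [hp2] using List.filter_append_perm (fun k => pl.contains k) keys)
  -- pairwise in the lex key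
  have hpw : (M1 ++ R').Pairwise
      (fun a b => (fun k => toLex (rank1 k, k)) a < (fun k => toLex (rank1 k, k)) b) := by
    rw [List.pairwise_append]
    refine ⟨?_, ?_, ?_⟩
    · refine (pv_dedup_idx pl p1).imp_of_mem ?_
      intro a b ha hb hab
      have ha' : a ∈ pl := hMpl a ha
      have hb' : b ∈ pl := hMpl b hb
      refine Prod.Lex.lt_iff.2 (Or.inl ?_)
      have : rank1 a < rank1 b := by
        rw [hr1 a ha', hr1 b hb']; exact_mod_cast hab
      simpa using this
    · have hle : sorted_keys.Pairwise (fun a b => a ≤ b) := by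
        simpa using PySem.List.sorted_pairwise keys (fun k => k)
      have hlt : sorted_keys.Pairwise (fun a b => a < b) :=
        (hle.and hsknd).imp (fun h => lt_of_le_of_ne h.1 h.2)
      refine ((hlt.sublist (List.filter_sublist :
        (List.filter p2 sorted_keys).Sublist sorted_keys)).imp_of_mem ?_)
      intro a b ha hb hab
      refine Prod.Lex.lt_iff.2 (Or.inr ⟨?_, by simpa using hab⟩)
      have : rank1 a = rank1 b := by rw [hr2 a (hRpl a ha), hr2 b (hRpl b hb)]
      simpa using this
    · intro a ha b hb
      refine Prod.Lex.lt_iff.2 (Or.inl ?_)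
      have : rank1 a < rank1 b := by
        rw [hr1 a (hMpl a ha), hr2 b (hRpl b hb)]
        exact_mod_cast List.idxOf_lt_length_of_mem (hMpl a ha)
      simpa using this
  -- assemble
  rw [hA1, hA2, hupd, pv_sorted2_eq_sorted_lex,
    PySem.List.sorted_eq_of_perm_of_pairwise_lt keys (M1 ++ R') (fun k => toLex (rank1 k, k)) hperm hpw]

-- ===== VERDICT (by name: the statement is the Claim_ definition above) =====
theorem sort_dict_by_name_spec : Claim_equal_sort_dict_by_name := by
  intro d pref_list _hdom hpre
  unfold Spec_sort_dict_by_name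
  exact pv_main d pref_list hpre
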